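-- pv_equiv track=rewrite | github.com/kjrelations/joint-decision-chess | decision_chess/decision_builder/builder_utils.py | is_valid_FEN
-- ===== SOURCE A (Python) =====
-- def is_valid_FEN(FEN):
--     count = 0
--     rows = 0
--     for piece in FEN:
--         if count > 8 or rows >= 8:
--             return False
--         if (piece.isdigit() and (int(piece) < 1 or int(piece) > 8)) or \
--            (not piece.isdigit() and piece.lower() not in 'pnbrqk/'):
--             return False
--         if piece == '/':
--             if count != 8:
--                 return False
--             else:
--                 count = 0
--                 rows += 1
--         elif piece.isdigit():
--             count += int(piece)
--         else:
--             count += 1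
--     return count == 8 and rows == 7
-- ===== SOURCE B (Python) =====
-- def is_valid_FEN(FEN):
--     segments = FEN.split('/')
--     if len(segments) != 8:
--         return False
--     for segment in segments:
--         total = 0
--         for ch in segment:
--             if ch.isdigit():
--                 v = int(ch)
--                 if v < 1 or v > 8:
--                     return False
--                 total += v
--             elif ch.lower() in 'pnbrqk':
--                 total += 1
--             else:
--                 return False
--         if total != 8:
--             return False
--     return True
-- ===== Notes on version B (the rewrite author's own statement) =====
-- stated objective: simpler
-- what changed: B replaces A's single character-by-character state machine (count/rows counters with in-loop guards) by splitting on the slash separator into segments, a length check, and a per-segment sum check.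
import Mathlib
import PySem

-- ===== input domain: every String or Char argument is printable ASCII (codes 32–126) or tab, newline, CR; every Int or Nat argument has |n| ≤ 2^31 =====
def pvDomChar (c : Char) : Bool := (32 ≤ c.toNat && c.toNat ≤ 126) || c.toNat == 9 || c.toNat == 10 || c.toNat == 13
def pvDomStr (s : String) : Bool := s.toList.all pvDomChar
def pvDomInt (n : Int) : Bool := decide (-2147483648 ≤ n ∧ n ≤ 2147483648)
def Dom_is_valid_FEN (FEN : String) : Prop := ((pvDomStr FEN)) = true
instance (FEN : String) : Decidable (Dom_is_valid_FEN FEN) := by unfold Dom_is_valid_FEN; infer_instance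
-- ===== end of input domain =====

-- B restructures A's one-pass state machine as split-on-slash + per-segment sum checks (objective: simpler).

-- ===== PORT A =====
-- int(piece): piece is guarded by piece.isdigit(), so on the ASCII domain ofChars? is always `some`
def pvDigitVal (c : Char) : Int := (PySem.Int.ofChars? [c]).getD 0

def pvLoopA : List Char → Int → Int → Bool
  | [], count, rows => count == 8 && rows == 7
  | c :: rest, count, rows =>
    if count > 8 || rows ≥ 8 then false
    else if (PySem.Chars.isdigit c && (pvDigitVal c < 1 || pvDigitVal c > 8))
         || (!PySem.Chars.isdigit c && !PySem.Chars.isIn [PySem.Chars.lowerChar c] ['p','n','b','r','q','k','/']) then false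
    else if c = '/' then
      if count ≠ 8 then false else pvLoopA rest 0 (rows + 1)
    else if PySem.Chars.isdigit c then pvLoopA rest (count + pvDigitVal c) rows
    else pvLoopA rest (count + 1) rows

def is_valid_FEN (FEN : String) : Bool := pvLoopA FEN.toList 0 0

-- ===== PORT B =====
-- port of FEN.split('/') (single-character, non-empty separator)
def pvSplitSlash : List Char → List (List Char)
  | [] => [[]]
  | c :: rest =>
    if c = '/' then [] :: pvSplitSlash rest
    else
      match pvSplitSlash rest with
      | [] => [[c]]
      | s :: ss => (c :: s) :: ss

-- the inner loop over one segment: `none` = an early `return False` on an invalid char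
def pvRowTotal (total : Int) : List Char → Option Int
  | [] => some total
  | c :: cs =>
    if PySem.Chars.isdigit c then
      if pvDigitVal c < 1 || pvDigitVal c > 8 then none else pvRowTotal (total + pvDigitVal c) cs
    else if PySem.Chars.isIn [PySem.Chars.lowerChar c] ['p','n','b','r','q','k'] then
      pvRowTotal (total + 1) cs
    else none

def pvCheckSegs : List (List Char) → Bool
  | [] => true
  | s :: rest =>
    match pvRowTotal 0 s with
    | none => false
    | some t => if t ≠ 8 then false else pvCheckSegs rest

def is_valid_FEN_alt (FEN : String) : Bool :=
  let segs := pvSplitSlash FEN.toList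
  if segs.length ≠ 8 then false else pvCheckSegs segs

-- ===== PRECONDITION & SPEC =====
def Spec_is_valid_FEN (FEN : String) (out : Bool) : Prop := out = is_valid_FEN_alt FEN
instance (FEN : String) (out : Bool) : Decidable (Spec_is_valid_FEN FEN out) := by unfold Spec_is_valid_FEN; infer_instance

-- ===== CLAIM (what is proved, stated in full; the proofs are below) =====
def Claim_equal_is_valid_FEN : Prop := ∀ (FEN : String), Dom_is_valid_FEN FEN → Spec_is_valid_FEN FEN (is_valid_FEN FEN)

-- ===== LEMMAS AND PROOFS =====

-- A's result, phrased over the segment list: the state machine restarted at each separator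
def pvBridge : List (List Char) → Int → Int → Bool
  | [], _, _ => true
  | [s], count, rows => decide (pvRowTotal count s = some 8) && decide (rows = 7)
  | s :: s' :: rest, count, rows =>
    if 8 ≤ rows then false
    else if pvRowTotal count s = some 8 then pvBridge (s' :: rest) 0 (rows + 1)
    else false

theorem pvSplitSlash_ne_nil (l : List Char) : pvSplitSlash l ≠ [] := by
  cases l with
  | nil => simp [pvSplitSlash]
  | cons c rest =>
    simp only [pvSplitSlash]
    split
    · simp
    · cases h : pvSplitSlash rest <;> simp

theorem pvRowTotal_mono (s : List Char) (count t : Int) (h : pvRowTotal count s = some t) :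
    count ≤ t := by
  induction s generalizing count with
  | nil => simp [pvRowTotal] at h; omega
  | cons c cs ih =>
    simp only [pvRowTotal] at h
    split_ifs at h with h1 h2 h3
    · have hv : ¬(pvDigitVal c < 1 ∨ pvDigitVal c > 8) := by simpa using h2
      have := ih _ h; omega
    · have := ih _ h; omega

theorem pvIsIn_singleton (x : Char) (l : List Char) :
    PySem.Chars.isIn [x] l = true ↔ x ∈ l := by
  rw [PySem.Chars.isIn_iff_infix, List.singleton_infix_iff]

theorem lowerChar_ne_slash (c : Char) (hc : c ≠ '/') : PySem.Chars.lowerChar c ≠ '/' := by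
  unfold PySem.Chars.lowerChar
  split
  · rename_i hu
    simp only [PySem.Chars.isupper, Bool.and_eq_true, decide_eq_true_eq] at hu
    have h1 : 65 ≤ c.toNat := Nat.succ_le_of_lt hu.1
    have h2 : c.toNat ≤ 90 := Fin.mk_le_mk.mp hu.2
    intro he
    have h3 : (Char.ofNat (c.toNat + 32)).toNat = 47 := by rw [he]; rfl
    have hv : (c.toNat + 32).isValidChar := Or.inl (by omega)
    rw [Char.toNat_ofNat, if_pos hv] at h3
    omega
  · exact hc

theorem pvBridge_false (seg : List Char) (segs : List (List Char)) (count rows : Int)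
    (h : 8 < count ∨ 8 ≤ rows) : pvBridge (seg :: segs) count rows = false := by
  match seg, segs with
  | s, [] =>
    simp only [pvBridge]
    rcases h with h | h
    · cases hrt : pvRowTotal count s with
      | none => simp
      | some t =>
        have := pvRowTotal_mono s count t hrt
        simp [show t ≠ 8 by omega]
    · simp [show rows ≠ 7 by omega]
  | s, s' :: rest =>
    simp only [pvBridge]
    split_ifs with g1 g2
    · rfl
    · rcases h with h | h
      · exact absurd (pvRowTotal_mono s count 8 g2) (by omega)
      · exact absurd h g1
    · rfl

theorem pvCheckSegs_cons (s : List Char) (rest : List (List Char)) :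
    pvCheckSegs (s :: rest) = (decide (pvRowTotal 0 s = some 8) && pvCheckSegs rest) := by
  simp only [pvCheckSegs]
  cases h : pvRowTotal 0 s with
  | none => simp
  | some t => by_cases ht : t = (8 : Int) <;> simp [ht]

theorem pvBridge_congr (s1 s2 : List Char) (c1 c2 : Int)
    (h : pvRowTotal c1 s1 = pvRowTotal c2 s2) (ss : List (List Char)) (rows : Int) :
    pvBridge (s1 :: ss) c1 rows = pvBridge (s2 :: ss) c2 rows := by
  cases ss <;> simp [pvBridge, h]

theorem pvBridgeCheck (s : List Char) (rest : List (List Char)) (count rows : Int) :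
    pvBridge (s :: rest) count rows =
      (decide (rows + ((s :: rest).length : Int) = 8) &&
        (decide (pvRowTotal count s = some 8) && pvCheckSegs rest)) := by
  induction rest generalizing s count rows with
  | nil =>
    simp only [pvBridge, pvCheckSegs, List.length]
    by_cases h7 : rows = (7 : Int)
    · subst h7; simp
    · simp [h7]
      intro hx _
      exact absurd (by omega : rows = (7 : Int)) h7
  | cons s' rest' ih =>
    simp only [pvBridge]
    split_ifs with g1 g2
    · have hl : ¬(rows + ((s :: s' :: rest').length : Int) = 8) := by
        simp only [List.length]; push_cast; omega
      rw [decide_eq_false hl]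
      simp
    · rw [ih s' 0 (rows + 1)]
      simp only [g2, decide_true, Bool.true_and, pvCheckSegs_cons]
      congr 1
      exact decide_eq_decide.mpr (by simp only [List.length]; push_cast; omega)
    · simp [g2]

theorem pvRowTotal_none_of_bad (c : Char) (s : List Char) (count : Int)
    (hbad : ((PySem.Chars.isdigit c && (pvDigitVal c < 1 || pvDigitVal c > 8))
         || (!PySem.Chars.isdigit c &&
              !PySem.Chars.isIn [PySem.Chars.lowerChar c] ['p','n','b','r','q','k','/'])) = true) :
    pvRowTotal count (c :: s) = none := by
  simp only [Bool.or_eq_true, Bool.and_eq_true, Bool.not_eq_true'] at hbad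
  simp only [pvRowTotal]
  rcases hbad with ⟨hd, hv⟩ | ⟨hd, hin⟩
  · rcases hv with hv | hv <;> simp [hd, hv]
  · have hsmall : PySem.Chars.isIn [PySem.Chars.lowerChar c] ['p','n','b','r','q','k'] = false := by
      cases hx : PySem.Chars.isIn [PySem.Chars.lowerChar c] ['p','n','b','r','q','k'] with
      | false => rfl
      | true =>
        exfalso
        have hmem := (pvIsIn_singleton _ _).mp hx
        have hb : PySem.Chars.lowerChar c ∈ ['p','n','b','r','q','k','/'] := by
          simp only [List.mem_cons, List.not_mem_nil, or_false] at hmem ⊢; tauto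
        rw [(pvIsIn_singleton _ _).mpr hb] at hin
        cases hin
    simp [hd, hsmall]

theorem pvRowTotal_step_digit (c : Char) (s : List Char) (count : Int)
    (hd : PySem.Chars.isdigit c = true)
    (hv : (pvDigitVal c < 1 || pvDigitVal c > 8) = false) :
    pvRowTotal count (c :: s) = pvRowTotal (count + pvDigitVal c) s := by
  simp only [pvRowTotal, hd, hv]
  simp

theorem pvRowTotal_step_letter (c : Char) (s : List Char) (count : Int) (hc : c ≠ '/')
    (hd : PySem.Chars.isdigit c = false)
    (hin : PySem.Chars.isIn [PySem.Chars.lowerChar c] ['p','n','b','r','q','k','/'] = true) :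
    pvRowTotal count (c :: s) = pvRowTotal (count + 1) s := by
  have hmem := (pvIsIn_singleton _ _).mp hin
  have hns := lowerChar_ne_slash c hc
  have hmem' : PySem.Chars.lowerChar c ∈ ['p','n','b','r','q','k'] := by
    simp only [List.mem_cons, List.not_mem_nil, or_false] at hmem ⊢
    rcases hmem with h|h|h|h|h|h|h <;> first | (exact absurd h hns) | tauto
  simp only [pvRowTotal, hd, (pvIsIn_singleton _ _).mpr hmem']
  simp

theorem pvMain (l : List Char) (count rows : Int) :
    pvLoopA l count rows = pvBridge (pvSplitSlash l) count rows := by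
  induction l generalizing count rows with
  | nil =>
    simp only [pvLoopA, pvSplitSlash, pvBridge, pvRowTotal]
    by_cases h8 : count = (8 : Int) <;> by_cases h7 : rows = (7 : Int) <;> simp [h8, h7]
  | cons c rest ih =>
    obtain ⟨s, ss, hsr⟩ : ∃ s ss, pvSplitSlash rest = s :: ss := by
      cases h : pvSplitSlash rest with
      | nil => exact absurd h (pvSplitSlash_ne_nil _)
      | cons a b => exact ⟨a, b, rfl⟩
    simp only [pvLoopA]
    split_ifs with g1 g2 g3 g4 g5
    · -- early return: count > 8 or rows ≥ 8
      simp only [Bool.or_eq_true, decide_eq_true_eq] at g1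
      by_cases hc : c = '/'
      · subst hc
        rw [show pvSplitSlash ('/' :: rest) = [] :: s :: ss by simp [pvSplitSlash, hsr]]
        rw [pvBridge_false _ _ _ _ (by omega)]
      · rw [show pvSplitSlash (c :: rest) = (c :: s) :: ss by simp [pvSplitSlash, hc, hsr]]
        rw [pvBridge_false _ _ _ _ (by omega)]
    · -- invalid character
      have hc : c ≠ '/' := by intro h; subst h; revert g2; decide
      rw [show pvSplitSlash (c :: rest) = (c :: s) :: ss by simp [pvSplitSlash, hc, hsr]]
      have hnone := pvRowTotal_none_of_bad c s count g2
      cases ss <;> simp [pvBridge, hnone]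
    · -- c = '/', count ≠ 8
      subst g3
      rw [show pvSplitSlash ('/' :: rest) = [] :: s :: ss by simp [pvSplitSlash, hsr]]
      simp only [Bool.or_eq_true, decide_eq_true_eq, not_or, not_lt, not_le] at g1
      simp [pvBridge, pvRowTotal, g4, show ¬(8 ≤ rows) by omega]
    · -- c = '/', count = 8
      subst g3
      rw [show pvSplitSlash ('/' :: rest) = [] :: s :: ss by simp [pvSplitSlash, hsr]]
      simp only [Bool.or_eq_true, decide_eq_true_eq, not_or, not_lt, not_le, not_not] at g1 g4
      rw [ih, hsr]
      simp [pvBridge, pvRowTotal, g4, show ¬(8 ≤ rows) by omega]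
    · -- digit character
      have hc : c ≠ '/' := by intro h; subst h; revert g5; decide
      rw [show pvSplitSlash (c :: rest) = (c :: s) :: ss by simp [pvSplitSlash, hc, hsr]]
      have hv : (pvDigitVal c < 1 || pvDigitVal c > 8) = false := by
        cases hvb : (decide (pvDigitVal c < 1) || decide (pvDigitVal c > 8))
        · rfl
        · exact absurd (by simp [g5, hvb]) g2
      rw [ih, hsr]
      exact pvBridge_congr s (c :: s) (count + pvDigitVal c) count
        (pvRowTotal_step_digit c s count g5 hv).symm ss rows
    · -- letter character
      have hd' : PySem.Chars.isdigit c = false := by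
        cases hx : PySem.Chars.isdigit c
        · rfl
        · exact absurd hx g5
      have hin : PySem.Chars.isIn [PySem.Chars.lowerChar c] ['p','n','b','r','q','k','/'] = true := by
        cases hx : PySem.Chars.isIn [PySem.Chars.lowerChar c] ['p','n','b','r','q','k','/']
        · exact absurd (by simp [hd', hx]) g2
        · rfl
      rw [show pvSplitSlash (c :: rest) = (c :: s) :: ss by simp [pvSplitSlash, g3, hsr]]
      rw [ih, hsr]
      exact pvBridge_congr s (c :: s) (count + 1) count
        (pvRowTotal_step_letter c s count g3 hd' hin).symm ss rows

-- ===== VERDICT (by name: the statement is the Claim_ definition above) =====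
theorem is_valid_FEN_spec : Claim_equal_is_valid_FEN := by
  intro FEN _
  unfold Spec_is_valid_FEN is_valid_FEN is_valid_FEN_alt
  rw [pvMain]
  obtain ⟨s, rest, hsr⟩ : ∃ s rest, pvSplitSlash FEN.toList = s :: rest := by
    cases h : pvSplitSlash FEN.toList with
    | nil => exact absurd h (pvSplitSlash_ne_nil _)
    | cons a b => exact ⟨a, b, rfl⟩
  rw [hsr, pvBridgeCheck]
  by_cases hlen : (s :: rest).length = 8
  · simp [hlen, pvCheckSegs_cons]
  · have hn : ¬(rest.length + 1 = 8) := by simpa using hlen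
    simp [show ¬((rest.length : Int) + 1 = 8) from by exact_mod_cast hn,
          show ¬(rest.length = 7) from by omega]
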